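-- pv_equiv track=rewrite | github.com/fareedasaad2710/optimization | milestone6/discrete_dragonfly.py | generate_swap_sequence
-- ===== SOURCE A (Python) =====
-- def generate_swap_sequence(path1, path2, max_swaps=5):
--     """Generate swap sequence to transform path1 toward path2"""
--     swap_seq = []
--     new_path = path1.copy()
--
--     # Find differences and create swaps
--     for _ in range(min(max_swaps, len(path1))):
--         # Find first position where paths differ
--         diff_pos = None
--         for i in range(min(len(new_path), len(path2))):
--             if new_path[i] != path2[i]:
--                 diff_pos = i
--                 break
--
--         if diff_pos is None:
--             break
--
--         # Find where the correct element is in new_path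
--         target_val = path2[diff_pos]
--         target_pos = None
--         for j in range(diff_pos + 1, len(new_path)):
--             if new_path[j] == target_val:
--                 target_pos = j
--                 break
--
--         if target_pos is not None:
--             swap_seq.append((diff_pos, target_pos))
--             new_path[diff_pos], new_path[target_pos] = new_path[target_pos], new_path[diff_pos]
--
--     return swap_seq
-- ===== SOURCE B (Python) =====
-- def generate_swap_sequence(path1, path2, max_swaps=5):
--     """Single monotone pass: the first-difference pointer only moves forward,
--     so the restart-from-zero diff scan of the original is unnecessary."""
--     bound = min(max_swaps, len(path1))
--     new_path = path1.copy()
--     swaps = []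
--     for i in range(min(len(new_path), len(path2))):
--         if len(swaps) >= bound:
--             break
--         if new_path[i] != path2[i]:
--             target = path2[i]
--             j = next((k for k in range(i + 1, len(new_path)) if new_path[k] == target), None)
--             if j is None:
--                 break
--             swaps.append((i, j))
--             new_path[i], new_path[j] = new_path[j], new_path[i]
--     return swaps
-- ===== Notes on version B (the rewrite author's own statement) =====
-- stated objective: faster
-- what changed: Replaced A's nested restart-scan (each outer iteration re-finds the first difference by scanning from index 0) with a single forward pass whose difference pointer only moves ahead, since a swap fixes the current position and never disturbs the matched prefix; target lookup stays a forward scan from that pointer.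
import Mathlib
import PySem

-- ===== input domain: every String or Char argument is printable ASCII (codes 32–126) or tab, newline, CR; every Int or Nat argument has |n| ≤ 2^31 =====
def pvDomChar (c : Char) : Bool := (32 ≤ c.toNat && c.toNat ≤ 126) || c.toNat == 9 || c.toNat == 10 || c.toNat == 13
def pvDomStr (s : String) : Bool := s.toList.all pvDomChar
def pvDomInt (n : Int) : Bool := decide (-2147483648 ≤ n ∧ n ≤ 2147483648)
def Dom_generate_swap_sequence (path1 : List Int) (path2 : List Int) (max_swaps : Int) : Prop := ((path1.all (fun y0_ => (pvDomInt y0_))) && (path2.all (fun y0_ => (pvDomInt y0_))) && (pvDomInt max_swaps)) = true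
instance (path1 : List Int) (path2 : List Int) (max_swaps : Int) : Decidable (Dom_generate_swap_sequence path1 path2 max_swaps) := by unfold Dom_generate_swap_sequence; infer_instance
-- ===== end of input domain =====

-- B replaces A's restart-from-zero first-difference rescan (per swap) by a single
-- monotone forward pass over the positions; return value only, no mutation observable.

-- ===== PORT A =====
-- A's outer 'for _ in range(min(max_swaps, len(path1)))' with its two inner break-scans;
-- state (new_path, swap_seq), fuel = number of remaining outer iterations.
def genA_iter (path2 : List Int) : Nat → List Int → List (Int × Int) → List (Int × Int)
  | 0, _, swaps => swaps
  | Nat.succ f, np, swaps =>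
    match (List.range (min np.length path2.length)).find?
        (fun i => np.getD i 0 != path2.getD i 0) with
    | none => swaps
    | some i =>
      match (List.range' (i + 1) (np.length - (i + 1))).find?
          (fun j => np.getD j 0 == path2.getD i 0) with
      | none => genA_iter path2 f np swaps
      | some j =>
        genA_iter path2 f ((np.set i (np.getD j 0)).set j (np.getD i 0))
          (swaps ++ [((i : Int), (j : Int))])

def generate_swap_sequence (path1 : List Int) (path2 : List Int) (max_swaps : Int) : List (Int × Int) :=
  genA_iter path2 (min max_swaps (path1.length : Int)).toNat path1 []

-- ===== PORT B =====
-- Source B's 'next((k for k in range(i+1, len(new_path)) if new_path[k] == target), None)'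
def pvFindTargetB (np : List Int) (target : Int) (s : Nat) : Option Nat :=
  (List.range' s (np.length - s)).find? (fun k => np.getD k 0 == target)

-- Source B's single for-loop over i in range(min(len(new_path), len(path2))) with breaks
def genB_go (path2 : List Int) (bound : Int) : List Nat → List Int → List (Int × Int) → List (Int × Int)
  | [], _, swaps => swaps
  | i :: rest, np, swaps =>
    if bound ≤ (swaps.length : Int) then swaps
    else if np.getD i 0 != path2.getD i 0 then
      match pvFindTargetB np (path2.getD i 0) (i + 1) with
      | none => swaps
      | some j =>
        genB_go path2 bound rest ((np.set i (np.getD j 0)).set j (np.getD i 0))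
          (swaps ++ [((i : Int), (j : Int))])
    else genB_go path2 bound rest np swaps

def generate_swap_sequence_alt (path1 : List Int) (path2 : List Int) (max_swaps : Int) : List (Int × Int) :=
  genB_go path2 (min max_swaps (path1.length : Int))
    (List.range (min path1.length path2.length)) path1 []

-- ===== PRECONDITION & SPEC =====
def Spec_generate_swap_sequence (path1 : List Int) (path2 : List Int) (max_swaps : Int) (out : List (Int × Int)) : Prop := out = generate_swap_sequence_alt path1 path2 max_swaps
instance (path1 : List Int) (path2 : List Int) (max_swaps : Int) (out : List (Int × Int)) : Decidable (Spec_generate_swap_sequence path1 path2 max_swaps out) := by unfold Spec_generate_swap_sequence; infer_instance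

-- ===== CLAIM (what is proved, stated in full; the proofs are below) =====
def Claim_equal_generate_swap_sequence : Prop := ∀ (path1 : List Int) (path2 : List Int) (max_swaps : Int), Dom_generate_swap_sequence path1 path2 max_swaps → Spec_generate_swap_sequence path1 path2 max_swaps (generate_swap_sequence path1 path2 max_swaps)

-- ===== LEMMAS AND PROOFS =====

-- find? over range' hits the first satisfying index
theorem find?_range'_first (p : Nat → Bool) :
    ∀ (n s i : Nat), s ≤ i → i < s + n → p i = true →
    (∀ k, s ≤ k → k < i → p k = false) →
    (List.range' s n).find? p = some i := by
  intro n
  induction n with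
  | zero => intro s i h1 h2; omega
  | succ m ih =>
    intro s i h1 h2 hp hmin
    rw [List.range'_succ]
    by_cases hsi : s = i
    · subst hsi
      exact List.find?_cons_of_pos hp
    · have hps : p s = false := hmin s le_rfl (by omega)
      rw [List.find?_cons_of_neg (by simp [hps])]
      exact ih (s + 1) i (by omega) (by omega) hp (fun k hk1 hk2 => hmin k (by omega) hk2)

theorem find?_range'_none (p : Nat → Bool) :
    ∀ (n s : Nat), (∀ k, s ≤ k → k < s + n → p k = false) →
    (List.range' s n).find? p = none := by
  intro n s h
  rw [List.find?_eq_none]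
  intro x hx
  rw [List.mem_range'_1] at hx
  simp [h x hx.1 hx.2]

-- if A is stuck (a difference exists but its target value occurs nowhere later),
-- the remaining outer iterations do nothing
theorem genA_stuck (path2 : List Int) (np : List Int) (i : Nat)
    (hd : (List.range (min np.length path2.length)).find?
        (fun k => np.getD k 0 != path2.getD k 0) = some i)
    (ht : (List.range' (i + 1) (np.length - (i + 1))).find?
        (fun j => np.getD j 0 == path2.getD i 0) = none) :
    ∀ (f : Nat) (swaps : List (Int × Int)), genA_iter path2 f np swaps = swaps := by
  intro f
  induction f with
  | zero => intro swaps; rfl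
  | succ g ih =>
    intro swaps
    simp only [genA_iter]
    simp only [hd, ht]
    exact ih swaps

theorem getD_set_ne (l : List Int) (a k : Nat) (v : Int) (h : k ≠ a) :
    (l.set a v).getD k 0 = l.getD k 0 := by
  simp [List.getD_eq_getElem?_getD, List.getElem?_set_ne (Ne.symm h)]

theorem getD_set_self (l : List Int) (a : Nat) (v : Int) (h : a < l.length) :
    (l.set a v).getD a 0 = v := by
  simp [List.getD_eq_getElem?_getD, h]

-- main invariant: with the prefix below i already matched, A's remaining outer loop
-- (fuel = bound - #swaps) equals B's pass over the remaining indices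
theorem key (path2 : List Int) (bound : Int) :
    ∀ (n : Nat) (np : List Int) (swaps : List (Int × Int)) (i : Nat),
    i + n = min np.length path2.length →
    (∀ k, k < i → np.getD k 0 = path2.getD k 0) →
    genA_iter path2 (bound - swaps.length).toNat np swaps
      = genB_go path2 bound (List.range' i n) np swaps := by
  intro n
  induction n with
  | zero =>
    intro np swaps i hlim hpre
    have hnone : (List.range (min np.length path2.length)).find?
        (fun k => np.getD k 0 != path2.getD k 0) = none := by
      rw [List.range_eq_range']
      apply find?_range'_none
      intro k hk1 hk2
      rw [bne_eq_false_iff_eq]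
      exact hpre k (by omega)
    cases hf : (bound - (swaps.length : Int)).toNat with
    | zero => simp [genA_iter, genB_go, List.range']
    | succ g =>
      simp only [genA_iter]
      rw [hnone]
      simp [genB_go, List.range']
  | succ m ih =>
    intro np swaps i hlim hpre
    rw [List.range'_succ]
    simp only [genB_go]
    by_cases hb : bound ≤ (swaps.length : Int)
    · have h0 : (bound - (swaps.length : Int)).toNat = 0 := by omega
      rw [h0, if_pos hb]
      rfl
    · rw [if_neg hb]
      have hi : i < min np.length path2.length := by omega
      by_cases heq : np.getD i 0 = path2.getD i 0
      · -- position i already matches: B steps on, A state unchanged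
        have hfalse : (np.getD i 0 != path2.getD i 0) = false := by
          rw [bne_eq_false_iff_eq]; exact heq
        rw [if_neg (by rw [hfalse]; exact Bool.false_ne_true)]
        exact ih np swaps (i + 1) (by omega)
          (fun k hk => by rcases Nat.lt_succ_iff_lt_or_eq.mp hk with h | h
                          · exact hpre k h
                          · subst h; exact heq)
      · -- a real difference at i: A finds diff_pos = i
        have hne : (np.getD i 0 != path2.getD i 0) = true := by
          rw [bne_iff_ne]; exact heq
        rw [if_pos hne]
        have hdiff : (List.range (min np.length path2.length)).find?
            (fun k => np.getD k 0 != path2.getD k 0) = some i := by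
          rw [List.range_eq_range']
          exact find?_range'_first _ _ 0 i (Nat.zero_le _) (by omega) hne
            (fun k _ hk => by rw [bne_eq_false_iff_eq]; exact hpre k hk)
        have hfuel : (bound - (swaps.length : Int)).toNat
            = ((bound - ((swaps.length : Int) + 1)).toNat) + 1 := by omega
        cases ht : pvFindTargetB np (path2.getD i 0) (i + 1) with
        | none =>
          unfold pvFindTargetB at ht
          exact genA_stuck path2 np i hdiff ht _ _
        | some j =>
          have hjmem := List.mem_range'_1.mp (List.mem_of_find?_eq_some ht)
          have hj1 : i + 1 ≤ j := hjmem.1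
          have hj2 : j < np.length := by omega
          have hjv : np.getD j 0 = path2.getD i 0 := by
            have := List.find?_some ht
            simpa using this
          rw [hfuel]
          simp only [genA_iter]
          unfold pvFindTargetB at ht
          simp only [hdiff, ht]
          have hlen : ((np.set i (np.getD j 0)).set j (np.getD i 0)).length = np.length := by
            simp
          have hkey := ih ((np.set i (np.getD j 0)).set j (np.getD i 0))
            (swaps ++ [((i : Int), (j : Int))]) (i + 1)
            (by rw [hlen]; omega)
            (fun k hk => by
              rcases Nat.lt_succ_iff_lt_or_eq.mp hk with h | h
              · rw [getD_set_ne _ _ _ _ (by omega), getD_set_ne _ _ _ _ (by omega)]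
                exact hpre k h
              · subst h
                rw [getD_set_ne _ _ _ _ (by omega), getD_set_self _ _ _ (by omega)]
                exact hjv)
          have hswlen : (((swaps ++ [((i : Int), (j : Int))]).length : Int))
              = (swaps.length : Int) + 1 := by simp
          rw [hswlen] at hkey
          exact hkey

-- ===== VERDICT (by name: the statement is the Claim_ definition above) =====
theorem generate_swap_sequence_spec : Claim_equal_generate_swap_sequence := by
  intro path1 path2 max_swaps _
  unfold Spec_generate_swap_sequence generate_swap_sequence generate_swap_sequence_alt
  rw [List.range_eq_range']
  have hkey := key path2 (min max_swaps (path1.length : Int))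
    (min path1.length path2.length) path1 [] 0 (by omega) (by omega)
  simpa using hkey
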